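-- pv_equiv track=rewrite | github.com/Sangmin627/AlgoStudy2023 | 상진/Baekjoon/String/BOJ4659.py | con2
-- ===== SOURCE A (Python) =====
-- vowel = ['a','e','i','o','u']
--
-- def con2(w):
--     if len(w) >= 3:
--         for i in range(1, len(w)-1):
--             if w[i-1] in vowel and w[i] in vowel and w[i+1] in vowel:
--                 return False
--             if w[i-1] not in vowel and w[i] not in vowel and w[i+1] not in vowel:
--                 return False
--     return True
-- ===== SOURCE B (Python) =====
-- def con2(w):
--     types = [c in 'aeiou' for c in w]
--     if not types:
--         return True
--     prev = types[0]
--     cnt = 1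
--     for t in types[1:]:
--         cnt = cnt + 1 if t == prev else 1
--         if cnt >= 3:
--             return False
--         prev = t
--     return True
-- ===== Notes on version B (the rewrite author's own statement) =====
-- stated objective: alternative
-- what changed: B replaces A's index-based sliding-window scan (checking w[i-1],w[i],w[i+1] at each index) with a single run-length counter over the vowel/consonant type sequence that fails as soon as a run of 3 equal types appears.
import Mathlib
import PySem

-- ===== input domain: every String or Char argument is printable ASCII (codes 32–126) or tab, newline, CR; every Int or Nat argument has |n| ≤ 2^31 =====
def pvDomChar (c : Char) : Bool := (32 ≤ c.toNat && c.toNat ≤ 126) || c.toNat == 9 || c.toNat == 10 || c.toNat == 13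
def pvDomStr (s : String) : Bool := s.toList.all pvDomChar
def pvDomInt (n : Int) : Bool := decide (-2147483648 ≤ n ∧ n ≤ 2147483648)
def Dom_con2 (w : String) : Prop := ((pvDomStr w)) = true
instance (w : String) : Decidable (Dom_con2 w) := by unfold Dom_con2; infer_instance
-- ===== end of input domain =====

-- B changes A's three-index sliding-window scan into a one-pass run-length counter over char types (alternative decomposition, same cost).

-- ===== PORT A =====
-- vowel = ['a','e','i','o','u']
def vowelA : List Char := ['a','e','i','o','u']

-- the 'for i in range(1, len(w)-1)' loop with its two early 'return False' branches
def con2Loop (cs : List Char) : List Int → Bool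
  | [] => true
  | i :: rest =>
      if vowelA.contains (PySem.List.pyGetD cs (i - 1) ' ') &&
         vowelA.contains (PySem.List.pyGetD cs i ' ') &&
         vowelA.contains (PySem.List.pyGetD cs (i + 1) ' ') then false
      else if !vowelA.contains (PySem.List.pyGetD cs (i - 1) ' ') &&
              !vowelA.contains (PySem.List.pyGetD cs i ' ') &&
              !vowelA.contains (PySem.List.pyGetD cs (i + 1) ' ') then false
      else con2Loop cs rest

def con2 (w : String) : Bool :=
  let cs := w.toList
  if (cs.length : Int) ≥ 3 then
    con2Loop cs (PySem.List.pyRange 1 ((cs.length : Int) - 1) 1)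
  else true

-- ===== PORT B =====
def isVowelB (c : Char) : Bool := ("aeiou".toList).contains c

-- the run-counter loop: prev type, current run length, remaining types
def runLoop : Bool → Nat → List Bool → Bool
  | _, _, [] => true
  | p, cnt, t :: rest =>
      let cnt' := if t == p then cnt + 1 else 1
      if cnt' ≥ 3 then false else runLoop t cnt' rest

def con2_alt (w : String) : Bool :=
  match w.toList.map isVowelB with
  | [] => true
  | t :: rest => runLoop t 1 rest

-- ===== PRECONDITION & SPEC =====
def Spec_con2 (w : String) (out : Bool) : Prop := out = con2_alt w
instance (w : String) (out : Bool) : Decidable (Spec_con2 w out) := by unfold Spec_con2; infer_instance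

-- ===== CLAIM (what is proved, stated in full; the proofs are below) =====
def Claim_equal_con2 : Prop := ∀ (w : String), Dom_con2 w → Spec_con2 w (con2 w)

-- ===== LEMMAS AND PROOFS =====

-- common characterisation: the type sequence contains three consecutive equal entries
def hasTriple : List Bool → Bool
  | a :: b :: c :: rest => (a == b && b == c) || hasTriple (b :: c :: rest)
  | _ => false

lemma hasTriple_short (ts : List Bool) (h : ts.length ≤ 2) : hasTriple ts = false := by
  match ts with
  | [] => rfl
  | [_] => rfl
  | [_, _] => rfl
  | _ :: _ :: _ :: _ => simp at h

lemma hasTriple_cons_ne (p t : Bool) (rest : List Bool) (h : p ≠ t) :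
    hasTriple (p :: t :: rest) = hasTriple (t :: rest) := by
  cases rest with
  | nil => simp [hasTriple]
  | cons c r => simp [hasTriple, h]

lemma runLoop_both (ts : List Bool) : ∀ p : Bool,
    (runLoop p 1 ts = !hasTriple (p :: ts)) ∧
    (runLoop p 2 ts = !hasTriple (p :: p :: ts)) := by
  induction ts with
  | nil => intro p; simp [runLoop, hasTriple]
  | cons t rest ih =>
    intro p
    constructor
    · by_cases h : t = p
      · subst h
        simp only [runLoop, beq_self_eq_true, if_true]
        norm_num
        exact (ih t).2
      · have hne : (t == p) = false := by simp [h]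
        simp only [runLoop, hne, Bool.false_eq_true, if_false]
        norm_num
        rw [(ih t).1, hasTriple_cons_ne p t rest (Ne.symm h)]
    · by_cases h : t = p
      · subst h
        simp only [runLoop, beq_self_eq_true, if_true]
        norm_num [hasTriple]
      · have hne : (t == p) = false := by simp [h]
        have hne' : (p == t) = false := by simp [Ne.symm h]
        simp only [runLoop, hne, Bool.false_eq_true, if_false]
        norm_num
        rw [(ih t).1]
        have h1 : hasTriple (p :: p :: t :: rest) = hasTriple (p :: t :: rest) := by
          simp only [hasTriple, hne', Bool.and_false, Bool.false_or]
        rw [h1, hasTriple_cons_ne p t rest (Ne.symm h)]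

lemma con2_alt_eq (w : String) :
    con2_alt w = !hasTriple (w.toList.map isVowelB) := by
  unfold con2_alt
  cases h : w.toList.map isVowelB with
  | nil => simp [hasTriple]
  | cons t rest => exact (runLoop_both rest t).1

lemma isVowel_agree (c : Char) : vowelA.contains c = isVowelB c := rfl

lemma loopA_eq (cs : List Char) : ∀ (m k : Nat), k + 2 + m = cs.length →
    con2Loop cs (PySem.List.pyRange ((k : Int) + 1) ((cs.length : Int) - 1) 1) =
      !hasTriple ((cs.drop k).map isVowelB) := by
  intro m
  induction m with
  | zero =>
    intro k hk
    have hnil : PySem.List.pyRange ((k : Int) + 1) ((cs.length : Int) - 1) 1 = [] :=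
      PySem.List.pyRange_one_eq_nil (by omega)
    rw [hnil]
    have hlen : ((cs.drop k).map isVowelB).length ≤ 2 := by
      simp [List.length_drop]; omega
    rw [hasTriple_short _ hlen]
    rfl
  | succ m ih =>
    intro k hk
    have hklt : k < cs.length := by omega
    have hk1 : k + 1 < cs.length := by omega
    have hk2 : k + 2 < cs.length := by omega
    have hcons : PySem.List.pyRange ((k : Int) + 1) ((cs.length : Int) - 1) 1 =
        ((k : Int) + 1) :: PySem.List.pyRange ((k : Int) + 1 + 1) ((cs.length : Int) - 1) 1 :=
      PySem.List.pyRange_one_cons (by omega)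
    rw [hcons]
    have e0 : PySem.List.pyGetD cs ((k : Int) + 1 - 1) ' ' = cs[k] := by
      rw [PySem.List.pyGetD_eq_getElem cs ' ' (by omega) (by omega)]
      simp only [show ((k : Int) + 1 - 1).toNat = k from by omega]
    have e1 : PySem.List.pyGetD cs ((k : Int) + 1) ' ' = cs[k + 1] := by
      rw [PySem.List.pyGetD_eq_getElem cs ' ' (by omega) (by omega)]
      simp only [show ((k : Int) + 1).toNat = k + 1 from by omega]
    have e2 : PySem.List.pyGetD cs ((k : Int) + 1 + 1) ' ' = cs[k + 2] := by
      rw [PySem.List.pyGetD_eq_getElem cs ' ' (by omega) (by omega)]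
      simp only [show ((k : Int) + 1 + 1).toNat = k + 2 from by omega]
    have hdrop : cs.drop k = cs[k] :: cs[k + 1] :: cs[k + 2] :: cs.drop (k + 3) := by
      rw [List.drop_eq_getElem_cons hklt, List.drop_eq_getElem_cons hk1,
          List.drop_eq_getElem_cons hk2]
    have hdrop1 : cs.drop (k + 1) = cs[k + 1] :: cs[k + 2] :: cs.drop (k + 3) := by
      rw [List.drop_eq_getElem_cons hk1, List.drop_eq_getElem_cons hk2]
    simp only [con2Loop, e0, e1, e2, isVowel_agree]
    have ihr := ih (k + 1) (by omega)
    have ecast : ((k + 1 : Nat) : Int) + 1 = (k : Int) + 1 + 1 := by push_cast; ring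
    rw [ecast] at ihr
    rw [ihr, hdrop, hdrop1]
    simp only [List.map_cons]
    cases ha : isVowelB cs[k] <;> cases hb : isVowelB cs[k + 1] <;>
      cases hc : isVowelB cs[k + 2] <;> simp [hasTriple]

-- ===== VERDICT (by name: the statement is the Claim_ definition above) =====
theorem con2_spec : Claim_equal_con2 := by
  intro w _
  unfold Spec_con2 con2
  simp only []
  by_cases h : (w.toList.length : Int) ≥ 3
  · rw [if_pos h, con2_alt_eq]
    have := loopA_eq w.toList (w.toList.length - 2) 0 (by omega)
    simpa using this
  · rw [if_neg h, con2_alt_eq]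
    have : (w.toList.map isVowelB).length ≤ 2 := by rw [List.length_map]; omega
    rw [hasTriple_short _ this]
    rfl
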